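-- pv_equiv track=rewrite | github.com/SanthoshKumarRajendran/AdventOfCode | 2024/day7/day7-2.py | perform_operation
-- ===== SOURCE A (Python) =====
-- def perform_operation(current, rest, operation, i):
--     if len(rest) == 1:
--         if operation == 2: # Concatenate
--             return int(str(rest[0]) + str(current))
--         elif operation == 1: # Multiply
--             return current * rest[0]
--         else: # Add
--             return current + rest[0]
--
--     if operation == 2: # Concatenate
--         return int(str(perform_operation(rest[0], rest[1:], i % 3, int(i/3))) + str(current))
--     if operation == 1: # Multiply
--         return current * perform_operation(rest[0], rest[1:], i % 3, int(i/3))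
--     else: # Add
--         return current + perform_operation(rest[0], rest[1:], i % 3, int(i/3))
-- ===== SOURCE B (Python) =====
-- def perform_operation(current, rest, operation, i):
--     # Iterative right-to-left fold instead of recursion (no per-level list slicing).
--     vals = [current] + list(rest)
--     ops = [operation]
--     j = i
--     for _ in range(len(rest) - 1):
--         ops.append(j % 3)
--         j = int(j / 3)
--     acc = rest[-1]
--     for k in range(len(rest) - 1, -1, -1):
--         if ops[k] == 2:
--             acc = int(str(acc) + str(vals[k]))
--         elif ops[k] == 1:
--             acc = vals[k] * acc
--         else:
--             acc = vals[k] + acc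
--     return acc
-- ===== Notes on version B (the rewrite author's own statement) =====
-- stated objective: faster
-- what changed: Replaced A's recursion, which copies rest[1:] at every level, by an iterative version: precompute the operator list from i once, then fold right-to-left over the operand list with an accumulator.
import Mathlib
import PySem

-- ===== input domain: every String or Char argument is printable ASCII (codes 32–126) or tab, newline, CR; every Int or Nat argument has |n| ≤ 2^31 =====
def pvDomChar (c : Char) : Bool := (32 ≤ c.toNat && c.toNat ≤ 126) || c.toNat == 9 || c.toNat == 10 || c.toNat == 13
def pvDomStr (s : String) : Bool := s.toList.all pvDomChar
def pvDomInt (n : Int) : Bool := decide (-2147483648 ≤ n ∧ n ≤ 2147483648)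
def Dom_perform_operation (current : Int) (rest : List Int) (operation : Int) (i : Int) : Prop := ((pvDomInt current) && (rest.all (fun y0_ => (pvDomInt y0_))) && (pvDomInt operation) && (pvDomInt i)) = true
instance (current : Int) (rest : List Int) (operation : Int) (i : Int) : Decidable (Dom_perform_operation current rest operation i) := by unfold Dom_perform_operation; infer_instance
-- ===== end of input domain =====

-- B replaces A's recursion (which slices rest[1:] at every level) by one right-to-left
-- iterative fold over a precomputed operator list; return-value equivalence is proved.

-- int(str(a) + str(b)): exact when the concatenation parses as an int (Pre_ guarantees 0 ≤ b);
-- .getD 0 covers the ValueError region, which Pre_ excludes.  Shared by both ports.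
def pyConcat (a b : Int) : Int := (PySem.Int.ofStr? (PySem.Int.toStr a ++ PySem.Int.toStr b)).getD 0

-- ===== PORT A =====
-- int(i/3) is float division truncated toward zero; for |i| ≤ 2^31 (Dom) it equals Int.tdiv i 3 exactly.
def perform_operation : Int → List Int → Int → Int → Int
  | _, [], _, _ => 0  -- Python raises IndexError here (rest[0] on empty rest); excluded by Pre_
  | current, [r], operation, _ =>
    if operation == 2 then pyConcat r current
    else if operation == 1 then current * r
    else current + r
  | current, r :: s :: rs, operation, i =>
    if operation == 2 then
      pyConcat (perform_operation r (s :: rs) (PySem.Int.mod i 3) (i.tdiv 3)) current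
    else if operation == 1 then
      current * perform_operation r (s :: rs) (PySem.Int.mod i 3) (i.tdiv 3)
    else
      current + perform_operation r (s :: rs) (PySem.Int.mod i 3) (i.tdiv 3)

-- ===== PORT B =====
-- transliteration of Source B: vals = [current] + rest; ops built by appending j % 3, j = int(j/3)
-- (= Int.tdiv j 3, exact for |j| ≤ 2^31); then a fold over range(len(rest)-1, -1, -1).
def perform_operation_alt (current : Int) (rest : List Int) (operation : Int) (i : Int) : Int :=
  let vals : List Int := current :: rest
  let opsj : List Int × Int :=
    (PySem.List.pyRange 0 ((rest.length : Int) - 1) 1).foldl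
      (fun st _ => (st.1 ++ [PySem.Int.mod st.2 3], st.2.tdiv 3)) ([operation], i)
  let ops : List Int := opsj.1
  let acc0 : Int := (PySem.List.pyGet? rest (-1)).getD 0  -- rest[-1]; IndexError on [] excluded by Pre_
  (PySem.List.pyRange ((rest.length : Int) - 1) (-1) (-1)).foldl
    (fun acc k =>
      let opk := (PySem.List.pyGet? ops k).getD 0
      let vk := (PySem.List.pyGet? vals k).getD 0
      if opk == 2 then pyConcat acc vk
      else if opk == 1 then vk * acc
      else vk + acc) acc0

-- ===== PRECONDITION & SPEC =====
-- the operator applied at recursion depth k: the given operation at depth 0, then the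
-- base-3 digits of i (Python's i % 3 with truncated division int(i/3) iterated = tdiv by 3^(k-1))
def opAt (operation i : Int) (k : Nat) : Int :=
  if k = 0 then operation else PySem.Int.mod (i.tdiv (3 ^ (k - 1))) 3

-- Pre_ excludes exactly the inputs where Python A raises: empty rest (IndexError), and any
-- concatenation step whose right operand is negative (int('…-…') raises ValueError).
def Pre_perform_operation (current : Int) (rest : List Int) (operation : Int) (i : Int) : Prop :=
  rest ≠ [] ∧ ∀ k, k < rest.length → opAt operation i k = 2 → 0 ≤ (current :: rest).getD k 0
instance (current : Int) (rest : List Int) (operation : Int) (i : Int) : Decidable (Pre_perform_operation current rest operation i) := by unfold Pre_perform_operation; infer_instance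

def pvWitness_perform_operation : Int × List Int × Int × Int := (5, [2, 3, 7], 2, 5)

def Spec_perform_operation (current : Int) (rest : List Int) (operation : Int) (i : Int) (out : Int) : Prop := out = perform_operation_alt current rest operation i
instance (current : Int) (rest : List Int) (operation : Int) (i : Int) (out : Int) : Decidable (Spec_perform_operation current rest operation i out) := by unfold Spec_perform_operation; infer_instance

-- ===== CLAIM (what is proved, stated in full; the proofs are below) =====
def Claim_equal_perform_operation : Prop := ∀ (current : Int) (rest : List Int) (operation : Int) (i : Int), Dom_perform_operation current rest operation i → Pre_perform_operation current rest operation i → Spec_perform_operation current rest operation i (perform_operation current rest operation i)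

-- ===== LEMMAS AND PROOFS =====

-- combine one operator: c is the 'current' of that level, d the value of the deeper levels
def pvCombine (op c d : Int) : Int :=
  if op == 2 then pyConcat d c else if op == 1 then c * d else c + d

-- evaluate an operator list over a value list (|ops| + 1 = |vals|), front operator outermost
def pvEval : List Int → List Int → Int
  | [], [a] => a
  | op :: ops, v :: tl => pvCombine op v (pvEval ops tl)
  | _, _ => 0

-- the trailing operators A derives from i
def pvDigits : Int → Nat → List Int
  | _, 0 => []
  | j, n + 1 => PySem.Int.mod j 3 :: pvDigits (j.tdiv 3) n

theorem A_eq_pvEval (rs : List Int) : ∀ (r c op i : Int),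
    perform_operation c (r :: rs) op i = pvEval (op :: pvDigits i rs.length) (c :: r :: rs) := by
  induction rs with
  | nil => intro r c op i; simp [perform_operation, pvEval, pvDigits, pvCombine]
  | cons s ss ih =>
    intro r c op i
    simp only [perform_operation, List.length_cons, pvDigits, pvEval, pvCombine, ih]

theorem buildOps_eq (l : List Int) : ∀ (acc : List Int) (j : Int),
    (l.foldl (fun st _ => (st.1 ++ [PySem.Int.mod st.2 3], st.2.tdiv 3)) (acc, j)).1
      = acc ++ pvDigits j l.length := by
  induction l with
  | nil => intro acc j; simp [pvDigits]
  | cons x xs ih =>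
    intro acc j
    simp only [List.foldl_cons, List.length_cons, pvDigits, ih]
    simp

theorem pvEval_snoc (ops : List Int) : ∀ (vs : List Int), ops.length = vs.length →
    ∀ (o v a : Int), pvEval (ops ++ [o]) (vs ++ [v, a]) = pvEval ops (vs ++ [pvCombine o v a]) := by
  induction ops with
  | nil =>
    intro vs h o v a
    have : vs = [] := List.eq_nil_of_length_eq_zero h.symm
    subst this
    simp [pvEval]
  | cons op ops ih =>
    intro vs h o v a
    cases vs with
    | nil => simp at h
    | cons u us =>
      simp only [List.length_cons, Nat.succ.injEq] at h
      simp only [List.cons_append, pvEval, ih us h]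

theorem foldDesc_eq (ops vals : List Int) (m : Nat) (hm : m ≤ ops.length)
    (hlen : vals.length = ops.length + 1) : ∀ (acc : Int),
    (PySem.List.pyRange ((m : Int) - 1) (-1) (-1)).foldl
      (fun acc k =>
        let opk := (PySem.List.pyGet? ops k).getD 0
        let vk := (PySem.List.pyGet? vals k).getD 0
        if opk == 2 then pyConcat acc vk
        else if opk == 1 then vk * acc
        else vk + acc) acc
      = pvEval (ops.take m) (vals.take m ++ [acc]) := by
  induction m with
  | zero =>
    intro acc
    rw [PySem.List.pyRange_neg_one_eq_nil (by norm_num)]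
    simp [pvEval]
  | succ m ih =>
    intro acc
    have hm' : m ≤ ops.length := Nat.le_of_succ_le hm
    have hmo : m < ops.length := hm
    have hmv : m < vals.length := by omega
    rw [show ((m + 1 : Nat) : Int) - 1 = (m : Int) by push_cast; ring]
    rw [PySem.List.pyRange_neg_one_cons (by omega)]
    simp only [List.foldl_cons]
    rw [PySem.List.pyGet?_natCast ops m, PySem.List.pyGet?_natCast vals m]
    rw [List.getElem?_eq_getElem hmo, List.getElem?_eq_getElem hmv]
    simp only [Option.getD_some]
    rw [ih hm']
    have htakeo : ops.take (m + 1) = ops.take m ++ [ops[m]] := by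
      rw [List.take_add_one, List.getElem?_eq_getElem hmo]; rfl
    have htakev : vals.take (m + 1) = vals.take m ++ [vals[m]] := by
      rw [List.take_add_one, List.getElem?_eq_getElem hmv]; rfl
    rw [htakeo, htakev]
    rw [List.append_assoc]
    simp only [List.singleton_append]
    rw [pvEval_snoc (ops.take m) (vals.take m)
        (by rw [List.length_take, List.length_take]; omega) ops[m] vals[m] acc]
    congr 1

theorem pvDigits_length (j : Int) (n : Nat) : (pvDigits j n).length = n := by
  induction n generalizing j with
  | zero => simp [pvDigits]
  | succ n ih => simp [pvDigits, ih]

theorem B_eq_pvEval (c : Int) (r : Int) (rs : List Int) (op i : Int) :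
    perform_operation_alt c (r :: rs) op i
      = pvEval (op :: pvDigits i rs.length) (c :: r :: rs) := by
  unfold perform_operation_alt
  simp only []
  have hops :
      ((PySem.List.pyRange 0 (((r :: rs).length : Int) - 1) 1).foldl
        (fun st _ => (st.1 ++ [PySem.Int.mod st.2 3], st.2.tdiv 3)) ([op], i)).1
      = op :: pvDigits i rs.length := by
    rw [buildOps_eq]
    rw [PySem.List.length_pyRange_one]
    simp
  rw [hops]
  have hacc : (PySem.List.pyGet? (r :: rs) (-1)).getD 0 = (c :: r :: rs)[rs.length + 1]'(by simp) := by
    rw [PySem.List.pyGet?_neg_one]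
    rw [List.getLast?_eq_some_getLast (by simp)]
    simp [List.getLast_eq_getElem]
  rw [hacc]
  have hlen1 : (op :: pvDigits i rs.length).length = rs.length + 1 := by
    simp [pvDigits_length]
  have hrange : (((r :: rs).length : Int) - 1) = ((rs.length + 1 : Nat) : Int) - 1 := by simp
  rw [hrange]
  rw [foldDesc_eq (op :: pvDigits i rs.length) (c :: r :: rs) (rs.length + 1)
      (by rw [hlen1]) (by simp [hlen1])]
  rw [List.take_of_length_le (by rw [hlen1])]
  have h2 : (c :: r :: rs).take (rs.length + 2) = c :: r :: rs := List.take_of_length_le (by simp)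
  have : (c :: r :: rs).take (rs.length + 1) ++ [(c :: r :: rs)[rs.length + 1]'(by simp)] = c :: r :: rs := by
    have h3 := List.take_add_one (l := c :: r :: rs) (i := rs.length + 1)
    rw [List.getElem?_eq_getElem (by simp)] at h3
    simp only [Option.toList_some] at h3
    rw [← h3]
    exact h2
  rw [this]

-- ===== VERDICT (by name: the statement is the Claim_ definition above) =====
theorem perform_operation_spec : Claim_equal_perform_operation := by
  intro current rest operation i _ hpre
  unfold Spec_perform_operation
  cases rest with
  | nil => exact absurd rfl hpre.1
  | cons r rs => rw [A_eq_pvEval, B_eq_pvEval]
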